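-- pv_equiv track=rewrite | github.com/FogadOg/txtFileToCsv | main.py | joinLinesInToArray
-- ===== SOURCE A (Python) =====
-- def joinLinesInToArray(linesInTxtFile):
--     #this method is to join the speaked line with the speaker
--     arrayOfLines=[]
--     sentance=""
--     for idx,line in enumerate(linesInTxtFile):
--         if "\n" in line and len(line)>2:
--             sentance+=line
--         else:
--             arrayOfLines.append(sentance.replace("\n",""))
--             sentance=""
--     return arrayOfLines
-- ===== SOURCE B (Python) =====
-- def joinLinesInToArray(linesInTxtFile):
--     # chunk-based: repeatedly take the maximal run of continuation lines,
--     # emit it joined (newlines stripped) at each delimiter line; a trailing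
--     # run with no delimiter after it is discarded (as the task requires).
--     def isCont(line):
--         return "\n" in line and len(line) > 2
--     out = []
--     i = 0
--     n = len(linesInTxtFile)
--     while True:
--         j = i
--         while j < n and isCont(linesInTxtFile[j]):
--             j += 1
--         if j == n:
--             return out
--         out.append("".join(linesInTxtFile[i:j]).replace("\n", ""))
--         i = j + 1
-- ===== Notes on version B (the rewrite author's own statement) =====
-- stated objective: alternative
-- what changed: Replaces A's single pass with a per-line string accumulator by a chunk-oriented loop that repeatedly splits off the maximal run of continuation lines (takewhile/dropwhile style), joins each run at its delimiter, and discards the trailing run.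
import Mathlib
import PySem

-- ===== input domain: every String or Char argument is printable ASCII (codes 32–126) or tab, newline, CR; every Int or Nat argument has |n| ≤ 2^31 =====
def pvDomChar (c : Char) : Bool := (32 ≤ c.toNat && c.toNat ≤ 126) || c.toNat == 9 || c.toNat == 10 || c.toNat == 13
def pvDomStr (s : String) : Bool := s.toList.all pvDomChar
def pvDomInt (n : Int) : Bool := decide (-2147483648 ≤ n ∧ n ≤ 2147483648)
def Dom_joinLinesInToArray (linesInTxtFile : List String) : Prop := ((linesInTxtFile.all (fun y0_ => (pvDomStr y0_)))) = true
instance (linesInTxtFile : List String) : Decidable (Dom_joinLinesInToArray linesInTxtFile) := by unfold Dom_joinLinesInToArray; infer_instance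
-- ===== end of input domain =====

-- B replaces A's per-line accumulator pass by a chunk loop splitting off maximal runs of continuation lines (alternative decomposition, same cost).

-- ===== PORT A =====
-- single pass, accumulating the pending sentence in a string
def joinLinesInToArray (linesInTxtFile : List String) : List String :=
  ((PySem.List.enumerate linesInTxtFile 0).foldl
    (fun (st : List String × String) p =>
      let line := p.2
      if PySem.Str.isIn "\n" line && decide (2 < PySem.Str.len line) then
        (st.1, st.2 ++ line)
      else
        (st.1 ++ [PySem.Str.replace st.2 "\n" ""], ""))
    ([], "")).1

-- ===== PORT B =====
def pvIsCont (line : String) : Bool :=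
  PySem.Str.isIn "\n" line && decide (2 < PySem.Str.len line)

-- chunk loop: take the maximal run of continuation lines; stop if no delimiter follows,
-- else emit the joined run (newlines removed) and continue after the delimiter
def joinLinesInToArray_alt (linesInTxtFile : List String) : List String :=
  match h : linesInTxtFile.dropWhile pvIsCont with
  | [] => []
  | _d :: rest' =>
      PySem.Str.replace (PySem.Str.join "" (linesInTxtFile.takeWhile pvIsCont)) "\n" ""
        :: joinLinesInToArray_alt rest'
termination_by linesInTxtFile.length
decreasing_by
  have h1 : (linesInTxtFile.dropWhile pvIsCont).length ≤ linesInTxtFile.length :=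
    List.length_dropWhile_le _ _
  rw [h] at h1; simp at h1; omega

-- ===== PRECONDITION & SPEC =====
def Spec_joinLinesInToArray (linesInTxtFile : List String) (out : List String) : Prop := out = joinLinesInToArray_alt linesInTxtFile
instance (linesInTxtFile : List String) (out : List String) : Decidable (Spec_joinLinesInToArray linesInTxtFile out) := by unfold Spec_joinLinesInToArray; infer_instance

-- ===== CLAIM (what is proved, stated in full; the proofs are below) =====
def Claim_equal_joinLinesInToArray : Prop := ∀ (linesInTxtFile : List String), Dom_joinLinesInToArray linesInTxtFile → Spec_joinLinesInToArray linesInTxtFile (joinLinesInToArray linesInTxtFile)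

-- ===== LEMMAS AND PROOFS =====

-- A's loop, abstracted to a recursion on the list with the pending string as parameter
def pvGroups (s : String) : List String → List String
  | [] => []
  | l :: ls =>
      if pvIsCont l then pvGroups (s ++ l) ls
      else PySem.Str.replace s "\n" "" :: pvGroups "" ls

theorem pvJoin_nil : PySem.Str.join "" ([] : List String) = "" := rfl

theorem pvIntercalate_nil_left (l : List (List Char)) : List.intercalate [] l = l.flatten := by
  induction l with
  | nil => rfl
  | cons a l ih =>
    cases l with
    | nil => simp [List.intercalate]
    | cons b r =>
      simp [List.intercalate] at ih ⊢
      simpa using ih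

theorem pvJoin_cons (x : String) (xs : List String) :
    PySem.Str.join "" (x :: xs) = x ++ PySem.Str.join "" xs := by
  simp [PySem.Str.join, PySem.Chars.join, pvIntercalate_nil_left, String.ofList_append]

-- A's fold equals pvGroups (pending string generalized)
theorem pvFold_eq_groups (ls : List String) (n : Int) (acc : List String) (s : String) :
    ((PySem.List.enumerate ls n).foldl
      (fun (st : List String × String) p =>
        let line := p.2
        if PySem.Str.isIn "\n" line && decide (2 < PySem.Str.len line) then
          (st.1, st.2 ++ line)
        else
          (st.1 ++ [PySem.Str.replace st.2 "\n" ""], ""))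
      (acc, s)).1 = acc ++ pvGroups s ls := by
  induction ls generalizing n acc s with
  | nil => simp [PySem.List.enumerate, pvGroups]
  | cons l ls ih =>
    simp only [PySem.List.enumerate, List.foldl_cons, pvGroups]
    by_cases hc : pvIsCont l
    · rw [if_pos (by simpa [pvIsCont] using hc), if_pos hc]
      exact ih (n + 1) acc (s ++ l)
    · rw [if_neg (by simpa [pvIsCont] using hc), if_neg hc]
      rw [ih (n + 1) (acc ++ [PySem.Str.replace s "\n" ""]) ""]
      simp

-- pvGroups equals B's chunk recursion (strong induction on length)
theorem pvGroups_eq_alt (ls : List String) :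
    (∀ s : String,
        pvGroups s ls =
          match ls.dropWhile pvIsCont with
          | [] => []
          | _d :: rest' =>
              PySem.Str.replace (s ++ PySem.Str.join "" (ls.takeWhile pvIsCont)) "\n" ""
                :: joinLinesInToArray_alt rest') ∧
      joinLinesInToArray_alt ls = pvGroups "" ls := by
  induction hn : ls.length using Nat.strong_induction_on generalizing ls with
  | _ n ih =>
    have part1 : ∀ s : String,
        pvGroups s ls =
          match ls.dropWhile pvIsCont with
          | [] => []
          | _d :: rest' =>
              PySem.Str.replace (s ++ PySem.Str.join "" (ls.takeWhile pvIsCont)) "\n" ""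
                :: joinLinesInToArray_alt rest' := by
      intro s
      match ls, hn with
      | [], _ => simp [pvGroups]
      | l :: ls, hn =>
        by_cases hc : pvIsCont l
        · rw [List.dropWhile_cons_of_pos hc, List.takeWhile_cons_of_pos hc]
          simp only [pvGroups, if_pos hc]
          rw [(ih ls.length (by simp [← hn]) ls rfl).1 (s ++ l)]
          cases hls : ls.dropWhile pvIsCont with
          | nil => rfl
          | cons d r => simp [pvJoin_cons, String.append_assoc]
        · rw [List.dropWhile_cons_of_neg hc, List.takeWhile_cons_of_neg hc]
          simp only [pvGroups, if_neg hc, pvJoin_nil]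
          rw [(ih ls.length (by simp [← hn]) ls rfl).2]
          simp
    refine ⟨part1, ?_⟩
    rw [joinLinesInToArray_alt, part1 ""]
    cases hls : ls.dropWhile pvIsCont with
    | nil => rfl
    | cons d r => simp

-- ===== VERDICT (by name: the statement is the Claim_ definition above) =====
theorem joinLinesInToArray_spec : Claim_equal_joinLinesInToArray := by
  intro ls _
  unfold Spec_joinLinesInToArray joinLinesInToArray
  rw [pvFold_eq_groups ls 0 [] ""]
  rw [(pvGroups_eq_alt ls).2]
  simp
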